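-- pv_equiv track=rewrite | github.com/T-800/LS4 | Renaud_Adequin.py | question7c
-- ===== SOURCE A (Python) =====
-- def question7c(T):
--     L = [v for v in T if T.count(v)>=5]
--     for i in L[::]:
--         if L.count(i)>=2:
--             L.remove(i)
--
--     i = 0
--     for t in L :
--         i+= t
--     return i
-- ===== SOURCE B (Python) =====
-- def question7c(T):
--     counts = {}
--     for v in T:
--         counts[v] = counts.get(v, 0) + 1
--     total = 0
--     for v, c in counts.items():
--         if c >= 5:
--             total += v
--     return total
-- ===== Notes on version B (the rewrite author's own statement) =====
-- stated objective: faster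
-- what changed: Replaced A's quadratic count-filter plus repeated count/remove deduplication passes with a single dict counting pass followed by one scan over the distinct values.
import Mathlib
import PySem

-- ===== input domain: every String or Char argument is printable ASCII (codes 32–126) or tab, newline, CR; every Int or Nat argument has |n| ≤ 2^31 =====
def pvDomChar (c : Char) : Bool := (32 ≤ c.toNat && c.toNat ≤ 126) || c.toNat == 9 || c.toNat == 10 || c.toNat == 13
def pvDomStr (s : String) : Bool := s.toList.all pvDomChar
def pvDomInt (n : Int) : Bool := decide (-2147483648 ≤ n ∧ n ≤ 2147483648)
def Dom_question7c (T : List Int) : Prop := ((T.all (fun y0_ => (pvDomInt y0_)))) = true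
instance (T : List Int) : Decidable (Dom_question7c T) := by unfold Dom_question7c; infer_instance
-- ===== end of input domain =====

-- B replaces A's quadratic count-filter and repeated count/remove passes with one dict
-- counting pass and one scan over the distinct values (objective: faster).

-- ===== PORT A =====
-- L = [v for v in T if T.count(v)>=5]; then for i in L[::]: if L.count(i)>=2: L.remove(i);
-- then sum L.  L.remove(i) is (PySem.List.remove? s i).getD s: the .getD fallback is never
-- taken since the guard 2 ≤ s.count i guarantees i ∈ s (Python's ValueError is unreachable).
def question7c (T : List Int) : Int :=
  let L := T.filter (fun v => decide (5 ≤ T.count v))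
  let L2 := (PySem.List.slice L none none).foldl
      (fun s i => if 2 ≤ s.count i then (PySem.List.remove? s i).getD s else s) L
  L2.foldl (fun i t => i + t) 0

-- ===== PORT B =====
-- counts = {}; for v in T: counts[v] = counts.get(v,0)+1; then sum keys with count >= 5.
def question7c_alt (T : List Int) : Int :=
  let counts : PySem.Dict Int Int :=
    T.foldl (fun d x => d.insert x (d.getD x 0 + 1)) PySem.Dict.empty
  counts.items.foldl (fun total kv => if 5 ≤ kv.2 then total + kv.1 else total) 0

-- ===== PRECONDITION & SPEC =====
def Spec_question7c (T : List Int) (out : Int) : Prop := out = question7c_alt T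
instance (T : List Int) (out : Int) : Decidable (Spec_question7c T out) := by unfold Spec_question7c; infer_instance

-- ===== CLAIM (what is proved, stated in full; the proofs are below) =====
def Claim_equal_question7c : Prop := ∀ (T : List Int), Dom_question7c T → Spec_question7c T (question7c T)

-- ===== LEMMAS AND PROOFS =====

-- A's dedup loop, counted: after processing ys from state s, the count of any value v is
-- max (s.count v - ys.count v) (min (s.count v) 1).
theorem pv_dedup_fold_count (ys : List Int) : ∀ (s : List Int) (v : Int),
    (ys.foldl (fun s i => if 2 ≤ s.count i then (PySem.List.remove? s i).getD s else s) s).count v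
      = max (s.count v - ys.count v) (min (s.count v) 1) := by
  induction ys with
  | nil => intro s v; simp
  | cons i ys ih =>
    intro s v
    simp only [List.foldl_cons]
    by_cases h2 : 2 ≤ s.count i
    · have hmem : i ∈ s := by
        have : 0 < s.count i := by omega
        exact List.count_pos_iff.mp this
      rw [if_pos h2, PySem.List.remove?_eq_some_erase s i hmem, Option.getD_some, ih]
      by_cases hv : v = i
      · subst hv
        rw [List.count_erase_self, List.count_cons_self]
        omega
      · rw [List.count_erase_of_ne hv]
        simp [Ne.symm hv]
    · rw [if_neg h2, ih]
      by_cases hv : v = i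
      · subst hv
        rw [List.count_cons_self]
        omega
      · simp [Ne.symm hv]

-- A's dedup loop permutes to Mathlib's dedup of L (same counts: each member once).
theorem pv_dedup_fold_perm (L : List Int) :
    (L.foldl (fun s i => if 2 ≤ s.count i then (PySem.List.remove? s i).getD s else s) L).Perm
      L.dedup := by
  rw [List.perm_iff_count]
  intro v
  rw [pv_dedup_fold_count, List.count_dedup]
  by_cases hv : v ∈ L
  · have : 0 < L.count v := List.count_pos_iff.mpr hv
    simp only [if_pos hv]
    omega
  · have : L.count v = 0 := List.count_eq_zero.mpr hv
    simp only [if_neg hv]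
    omega

-- B's accumulation loop is the sum of the kept keys.
theorem pv_foldl_if_add (l : List (Int × Int)) (a : Int) :
    l.foldl (fun total kv => if 5 ≤ kv.2 then total + kv.1 else total) a
      = a + ((l.filter (fun kv => decide (5 ≤ kv.2))).map Prod.fst).sum := by
  induction l generalizing a with
  | nil => simp
  | cons kv l ih =>
    by_cases h : 5 ≤ kv.2
    · simp [List.foldl_cons, h, ih]; ring
    · simp [List.foldl_cons, h, ih]

-- The two kept-key lists are permutations (both nodup, same membership).
theorem pv_keys_perm (T : List Int) :
    ((PySem.Set.ofList T).filter (fun k => decide (5 ≤ (T.count k : Int)))).Perm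
      (T.filter (fun v => decide (5 ≤ T.count v))).dedup := by
  apply (List.perm_ext_iff_of_nodup (List.Nodup.filter _ (PySem.Set.nodup_ofList T))
      (List.nodup_dedup _)).mpr
  intro v
  simp only [List.mem_filter, PySem.Set.mem_ofList, List.mem_dedup, decide_eq_true_eq]
  constructor
  · rintro ⟨hm, hc⟩
    exact ⟨hm, by exact_mod_cast hc⟩
  · rintro ⟨hm, hc⟩
    exact ⟨hm, by exact_mod_cast hc⟩

-- ===== VERDICT (by name: the statement is the Claim_ definition above) =====
theorem question7c_spec : Claim_equal_question7c := by
  intro T _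
  unfold Spec_question7c question7c question7c_alt
  simp only [PySem.List.slice_none_none]
  rw [PySem.Dict.foldl_insert_getD_add_one_eq_counter, PySem.Dict.items_counter,
    pv_foldl_if_add, zero_add]
  have hmapfilter :
      ((PySem.Set.ofList T).map (fun k => (k, (T.count k : Int)))).filter
          (fun kv => decide (5 ≤ kv.2))
        = ((PySem.Set.ofList T).filter (fun k => decide (5 ≤ (T.count k : Int)))).map
            (fun k => (k, (T.count k : Int))) := by
    rw [List.filter_map]
    rfl
  rw [hmapfilter, List.map_map]
  have hL : (List.foldl (fun (i : Int) t => i + t) 0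
      (List.foldl (fun s i => if 2 ≤ List.count i s then (PySem.List.remove? s i).getD s else s)
        (T.filter (fun v => decide (5 ≤ T.count v))) (T.filter (fun v => decide (5 ≤ T.count v)))))
      = (T.filter (fun v => decide (5 ≤ T.count v))).dedup.sum := by
    rw [← List.sum_eq_foldl]
    exact (pv_dedup_fold_perm _).sum_eq
  rw [hL, ← (pv_keys_perm T).sum_eq]
  simp [Function.comp_def]
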